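-- pv_equiv track=rewrite | github.com/andi611/Conditional-SpecGAN-Tensorflow | src/utils/preprocess_data.py | _energy_based_truncation
-- ===== SOURCE A (Python) =====
-- def _energy_based_truncation(waveform, energy, threshold):
-- 	start_idx = 0
-- 	end_idx = len(waveform) - 1
-- 	for idx, e in enumerate(energy):
-- 		if e > threshold: start_idx = idx; break
-- 	for idx, e in reversed(list(enumerate(energy))):
-- 		if e > threshold: end_idx = idx; break
-- 	waveform_t = waveform[start_idx:end_idx]
-- 	return waveform_t
-- ===== SOURCE B (Python) =====
-- def _energy_based_truncation(waveform, energy, threshold):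
-- 	first = None
-- 	last = None
-- 	for i, e in enumerate(energy):
-- 		if e > threshold:
-- 			if first is None:
-- 				first = i
-- 			last = i
-- 	if first is None:
-- 		return waveform[0:len(waveform) - 1]
-- 	return waveform[first:last]
-- ===== Notes on version B (the rewrite author's own statement) =====
-- stated objective: alternative
-- what changed: Replaces A's two staged break-scans (forward then over a reversed, materialised enumerate list) with one single pass that maintains a (first hit, last hit) accumulator, slicing with defaults only when no hit exists.
import Mathlib
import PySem

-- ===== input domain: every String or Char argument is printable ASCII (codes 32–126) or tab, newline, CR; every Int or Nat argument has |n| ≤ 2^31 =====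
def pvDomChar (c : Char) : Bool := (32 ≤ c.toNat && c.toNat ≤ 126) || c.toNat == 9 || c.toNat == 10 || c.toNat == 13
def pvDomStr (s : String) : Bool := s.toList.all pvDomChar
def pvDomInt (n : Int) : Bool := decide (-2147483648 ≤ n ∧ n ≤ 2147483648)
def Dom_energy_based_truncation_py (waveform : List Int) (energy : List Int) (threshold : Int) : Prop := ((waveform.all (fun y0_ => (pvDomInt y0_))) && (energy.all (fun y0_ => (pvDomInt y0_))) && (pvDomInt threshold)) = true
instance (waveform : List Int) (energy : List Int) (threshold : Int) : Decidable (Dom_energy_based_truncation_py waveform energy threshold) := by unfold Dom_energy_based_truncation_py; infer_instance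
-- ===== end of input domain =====

-- B replaces A's two staged break-scans with one single pass keeping a (first hit, last hit) accumulator; objective: alternative.

-- ===== PORT A =====
-- 'for idx, e in <pairs>: if e > threshold: <var> = idx; break' — returns the default when no hit
def pvBreakScan (threshold : Int) (d : Int) : List (Int × Int) → Int
  | [] => d
  | (i, e) :: rest => if e > threshold then i else pvBreakScan threshold d rest

def energy_based_truncation_py (waveform : List Int) (energy : List Int) (threshold : Int) : List Int :=
  let start_idx := pvBreakScan threshold 0 (PySem.List.enumerate energy)
  let end_idx := pvBreakScan threshold ((waveform.length : Int) - 1) (PySem.List.enumerate energy).reverse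
  PySem.List.slice waveform (some start_idx) (some end_idx)

-- ===== PORT B =====
-- single pass: 'if e > threshold: (if first is None: first = i); last = i'
def pvHitScan (threshold : Int) : Option Int × Option Int → List (Int × Int) → Option Int × Option Int
  | acc, [] => acc
  | (f, l), (i, e) :: rest =>
      if e > threshold then pvHitScan threshold (some (f.getD i), some i) rest
      else pvHitScan threshold (f, l) rest

def energy_based_truncation_py_alt (waveform : List Int) (energy : List Int) (threshold : Int) : List Int :=
  match pvHitScan threshold (none, none) (PySem.List.enumerate energy) with
  | (none, _) => PySem.List.slice waveform (some 0) (some ((waveform.length : Int) - 1))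
  | (some first, last) => PySem.List.slice waveform (some first) (some (last.getD 0))

-- ===== PRECONDITION & SPEC =====
def Spec_energy_based_truncation_py (waveform : List Int) (energy : List Int) (threshold : Int) (out : List Int) : Prop := out = energy_based_truncation_py_alt waveform energy threshold
instance (waveform : List Int) (energy : List Int) (threshold : Int) (out : List Int) : Decidable (Spec_energy_based_truncation_py waveform energy threshold out) := by unfold Spec_energy_based_truncation_py; infer_instance

-- ===== CLAIM (what is proved, stated in full; the proofs are below) =====
def Claim_equal_energy_based_truncation_py : Prop := ∀ (waveform : List Int) (energy : List Int) (threshold : Int), Dom_energy_based_truncation_py waveform energy threshold → Spec_energy_based_truncation_py waveform energy threshold (energy_based_truncation_py waveform energy threshold)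

-- ===== LEMMAS AND PROOFS =====
-- A break-scan over a pair list is the head (with default) of the filtered index list.
theorem pvBreakScan_eq_headD (t d : Int) (ps : List (Int × Int)) :
    pvBreakScan t d ps = ((ps.filter (fun p => p.2 > t)).map Prod.fst).headD d := by
  induction ps with
  | nil => rfl
  | cons p rest ih =>
    by_cases h : p.2 > t
    · simp [pvBreakScan, h]
    · simp [pvBreakScan, h, ih]

-- A break-scan over the reversed pair list is the last (with default) of the filtered index list.
theorem pvBreakScan_reverse_eq_getLastD (t d : Int) (ps : List (Int × Int)) :
    pvBreakScan t d ps.reverse = ((ps.filter (fun p => p.2 > t)).map Prod.fst).getLastD d := by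
  rw [pvBreakScan_eq_headD]
  simp [List.getLastD_eq_getLast?, List.head?_reverse]

-- The single-pass hit scan computes (first kept ∣ head of hits, last of hits ∣ last kept).
theorem pvHitScan_spec (t : Int) (f l : Option Int) (ps : List (Int × Int)) :
    pvHitScan t (f, l) ps =
      (f.or ((ps.filter (fun p => p.2 > t)).map Prod.fst).head?,
       (((ps.filter (fun p => p.2 > t)).map Prod.fst).getLast?).or l) := by
  induction ps generalizing f l with
  | nil => simp [pvHitScan]
  | cons p rest ih =>
    by_cases h : p.2 > t
    · have step : pvHitScan t (f, l) (p :: rest) = pvHitScan t (some (f.getD p.1), some p.1) rest := by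
        simp [pvHitScan, h]
      rw [step, ih, List.filter_cons_of_pos (by simp [h]), List.map_cons, List.head?_cons,
        List.getLast?_cons]
      refine Prod.ext ?_ ?_
      · cases f <;> simp [Option.or]
      · cases ((rest.filter (fun p => p.2 > t)).map Prod.fst).getLast? <;> simp [Option.or]
    · have step : pvHitScan t (f, l) (p :: rest) = pvHitScan t (f, l) rest := by
        simp [pvHitScan, h]
      rw [step, ih, List.filter_cons_of_neg (by simp [h])]

-- ===== VERDICT (by name: the statement is the Claim_ definition above) =====
theorem energy_based_truncation_py_spec : Claim_equal_energy_based_truncation_py := by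
  intro waveform energy threshold _
  unfold Spec_energy_based_truncation_py energy_based_truncation_py energy_based_truncation_py_alt
  rw [pvBreakScan_eq_headD, pvBreakScan_reverse_eq_getLastD, pvHitScan_spec]
  cases hh : ((PySem.List.enumerate energy).filter (fun p => p.2 > threshold)).map Prod.fst with
  | nil => simp [Option.or]
  | cons a as =>
    simp [List.headD, List.getLastD_eq_getLast?, List.getLast?_cons, Option.or, Option.getD]
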